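-- pv_equiv track=rewrite | github.com/SavantAdmin/studious-palm-tree | Python/robot_day_005_password_forge.py | pool_from_flags
-- ===== SOURCE A (Python) =====
-- import string
--
-- AMBIGUOUS = set("O0Il1|`'\"")
--
-- def pool_from_flags(lower: bool, upper: bool, digits: bool, symbols: bool, avoid_amb: bool) -> list[str]:
--     pools: list[str] = []
--     if lower:
--         pools.append(string.ascii_lowercase)
--     if upper:
--         pools.append(string.ascii_uppercase)
--     if digits:
--         pools.append(string.digits)
--     if symbols:
--         pools.append("!@#$%^&*()-_=+[]{}:,.?")
--
--     if avoid_amb: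
--         pools = ["".join(c for c in p if c not in AMBIGUOUS) for p in pools]
--
--     # Remove empty pools (possible if avoid_amb strips everything, unlikely).
--     return [p for p in pools if p]
-- ===== SOURCE B (Python) =====
-- # B: closed form — the deambiguated alphabets are precomputed literals, so the
-- # result is just a flag-selection from one of two constant tables (no per-char
-- # filtering, no empty-pool pass: no cleaned alphabet is ever empty).
-- PLAIN = ("abcdefghijklmnopqrstuvwxyz", "ABCDEFGHIJKLMNOPQRSTUVWXYZ",
--          "0123456789", "!@#$%^&*()-_=+[]{}:,.?")
-- CLEAN = ("abcdefghijkmnopqrstuvwxyz", "ABCDEFGHJKLMNPQRSTUVWXYZ",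
--          "23456789", "!@#$%^&*()-_=+[]{}:,.?")
--
-- def pool_from_flags(lower: bool, upper: bool, digits: bool, symbols: bool, avoid_amb: bool) -> list[str]:
--     alphabets = CLEAN if avoid_amb else PLAIN
--     return [a for f, a in zip((lower, upper, digits, symbols), alphabets) if f]
-- ===== Notes on version B (the rewrite author's own statement) =====
-- stated objective: simpler
-- what changed: B replaces A's runtime pipeline (build pools, strip ambiguous chars character-by-character, drop empties) with a closed-form selection from two precomputed constant alphabet tables (plain and deambiguated), since stripping is deterministic and never yields an empty pool.
import Mathlib
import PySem

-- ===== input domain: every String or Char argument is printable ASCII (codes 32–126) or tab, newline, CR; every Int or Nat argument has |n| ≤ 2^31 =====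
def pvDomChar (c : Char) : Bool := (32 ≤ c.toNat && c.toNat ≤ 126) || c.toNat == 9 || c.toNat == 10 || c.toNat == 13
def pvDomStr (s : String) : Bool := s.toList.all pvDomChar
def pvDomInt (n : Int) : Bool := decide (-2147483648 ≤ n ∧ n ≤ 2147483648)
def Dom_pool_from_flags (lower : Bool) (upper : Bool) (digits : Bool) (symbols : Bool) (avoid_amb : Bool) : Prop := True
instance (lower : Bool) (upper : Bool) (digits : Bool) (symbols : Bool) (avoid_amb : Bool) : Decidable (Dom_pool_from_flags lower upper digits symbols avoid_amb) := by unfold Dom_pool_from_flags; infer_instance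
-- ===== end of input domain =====

-- ===== PORT A =====
-- B is simpler: a closed-form selection from two precomputed constant tables replaces A's build/strip/drop-empties pipeline.
def pvAmbiguous : List Char := "O0Il1|`'\"".toList

def pool_from_flags (lower : Bool) (upper : Bool) (digits : Bool) (symbols : Bool) (avoid_amb : Bool) : List String :=
  let pools : List String := []
  let pools := if lower then pools ++ ["abcdefghijklmnopqrstuvwxyz"] else pools
  let pools := if upper then pools ++ ["ABCDEFGHIJKLMNOPQRSTUVWXYZ"] else pools
  let pools := if digits then pools ++ ["0123456789"] else pools
  let pools := if symbols then pools ++ ["!@#$%^&*()-_=+[]{}:,.?"] else pools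
  let pools := if avoid_amb then
      pools.map (fun p => String.mk (p.toList.filter (fun c => ¬ c ∈ pvAmbiguous)))
    else pools
  pools.filter (fun p => p ≠ "")

-- ===== PORT B =====
def pvPlain : List String :=
  ["abcdefghijklmnopqrstuvwxyz", "ABCDEFGHIJKLMNOPQRSTUVWXYZ", "0123456789", "!@#$%^&*()-_=+[]{}:,.?"]
def pvClean : List String :=
  ["abcdefghijkmnopqrstuvwxyz", "ABCDEFGHJKLMNPQRSTUVWXYZ", "23456789", "!@#$%^&*()-_=+[]{}:,.?"]

def pool_from_flags_alt (lower : Bool) (upper : Bool) (digits : Bool) (symbols : Bool) (avoid_amb : Bool) : List String :=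
  let alphabets := if avoid_amb then pvClean else pvPlain
  (([lower, upper, digits, symbols].zip alphabets).filter (fun fa => fa.1)).map (fun fa => fa.2)

-- ===== PRECONDITION & SPEC =====
def Spec_pool_from_flags (lower : Bool) (upper : Bool) (digits : Bool) (symbols : Bool) (avoid_amb : Bool) (out : List String) : Prop := out = pool_from_flags_alt lower upper digits symbols avoid_amb
instance (lower : Bool) (upper : Bool) (digits : Bool) (symbols : Bool) (avoid_amb : Bool) (out : List String) : Decidable (Spec_pool_from_flags lower upper digits symbols avoid_amb out) := by unfold Spec_pool_from_flags; infer_instance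

-- ===== CLAIM (what is proved, stated in full; the proofs are below) =====
def Claim_equal_pool_from_flags : Prop := ∀ (lower : Bool) (upper : Bool) (digits : Bool) (symbols : Bool) (avoid_amb : Bool), Dom_pool_from_flags lower upper digits symbols avoid_amb → Spec_pool_from_flags lower upper digits symbols avoid_amb (pool_from_flags lower upper digits symbols avoid_amb)

-- ===== LEMMAS AND PROOFS =====

-- ===== VERDICT (by name: the statement is the Claim_ definition above) =====
theorem pool_from_flags_spec : Claim_equal_pool_from_flags := by
  unfold Claim_equal_pool_from_flags
  decide
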